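-- pv_equiv track=rewrite | github.com/zel0rd/algorithm | 2. Implementation/문자열압축.py | compile
-- ===== SOURCE A (Python) =====
-- def compile(s, length):
--     split = []
--
--     for i in range( 0 , len(s), length):
--         split.append(s[i:i+length])
--
--     # prior 첫번째 부분 선언
--     count = 1
--     compressed = ''
--     prior = split[0]
--
--     # 압축하기
--     for i in range(1, len(split)):
--         if prior == split[i]:
--             count += 1
--         else:
--             if count == 1:
--                 compressed += prior
--                 prior = split[i]
--                 count = 1
--             else:
--                 compressed += str(count)+prior
--                 prior = split[i]
--                 count = 1
--
--     # 마지막 부분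
--     if count == 1:
--         compressed += prior
--     else:
--         compressed += str(count)+prior
--
--     return compressed
-- ===== SOURCE B (Python) =====
-- def compile(s, length):
--     split = [s[i:i+length] for i in range(0, len(s), length)]
--     out = []
--     j = 0
--     n = len(split)
--     while j < n:
--         k = j
--         while k < n and split[k] == split[j]:
--             k += 1
--         run = k - j
--         out.append(split[j] if run == 1 else str(run) + split[j])
--         j = k
--     return ''.join(out)
-- ===== Notes on version B (the rewrite author's own statement) =====
-- stated objective: alternative
-- what changed: A's single pass with a prior/count accumulator and deferred flushes is replaced by a run-boundary scan: an outer loop jumps from run start to run start, an inner loop measures each run, and the per-run pieces are joined at the end.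
import Mathlib
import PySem

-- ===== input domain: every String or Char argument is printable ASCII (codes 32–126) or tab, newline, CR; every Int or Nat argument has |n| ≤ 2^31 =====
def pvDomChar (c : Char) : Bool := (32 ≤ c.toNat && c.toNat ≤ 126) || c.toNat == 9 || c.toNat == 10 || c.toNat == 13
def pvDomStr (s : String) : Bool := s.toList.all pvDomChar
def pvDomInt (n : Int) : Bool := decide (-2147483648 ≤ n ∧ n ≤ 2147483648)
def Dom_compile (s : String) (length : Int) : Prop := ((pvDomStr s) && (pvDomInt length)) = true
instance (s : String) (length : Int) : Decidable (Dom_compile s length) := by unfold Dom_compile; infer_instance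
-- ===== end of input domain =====

-- B replaces A's prior/count accumulator loop with a run-boundary scan (advance k over each run,
-- emit once per run) and joins the pieces; objective: alternative decomposition, same cost.


-- ===== PORT A =====
-- one step of A's compression loop: state (count, compressed, prior)
def compileStep (st : Int × List Char × List Char) (x : List Char) : Int × List Char × List Char :=
  if st.2.2 == x then (st.1 + 1, st.2.1, st.2.2)
  else if st.1 == 1 then (1, st.2.1 ++ st.2.2, x)
  else (1, st.2.1 ++ PySem.Int.toChars st.1 ++ st.2.2, x)

-- A's trailing block: flush the pending run and return compressed
def aFinish (st : Int × List Char × List Char) : String :=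
  String.ofList (if st.1 == 1 then st.2.1 ++ st.2.2 else st.2.1 ++ PySem.Int.toChars st.1 ++ st.2.2)

-- A's body after building split: prior = split[0], the indexed loop, the final flush
def aCompress (split : List (List Char)) : String :=
  match PySem.List.pyGet? split 0 with
  | none => ""   -- IndexError (split[0]); excluded by Pre_compile
  | some prior0 =>
    aFinish ((PySem.List.pyRange 1 (split.length : Int) 1).foldl
      (fun st i => compileStep st (PySem.List.pyGetD split i [])) ((1 : Int), ([] : List Char), prior0))

def compile (s : String) (length : Int) : String :=
  aCompress ((PySem.List.pyRange 0 (PySem.Str.len s) length).foldl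
    (fun acc i => acc ++ [PySem.List.slice s.toList (some i) (some (i + length))]) [])

-- ===== PORT B =====
-- B's inner while loop: how many chunks at the front of the rest equal c
def countRun (c : List Char) : List (List Char) → Nat
  | [] => 0
  | x :: xs => if x == c then countRun c xs + 1 else 0

-- B's outer while loop: one output piece per run, then jump to the next run
def runPieces : List (List Char) → List (List Char)
  | [] => []
  | c :: rest =>
    let k := countRun c rest
    (if ((k : Int) + 1) == 1 then c else PySem.Int.toChars ((k : Int) + 1) ++ c)
      :: runPieces (rest.drop k)
  termination_by l => l.length
  decreasing_by simp

def compile_alt (s : String) (length : Int) : String :=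
  String.ofList (PySem.Chars.join [] (runPieces
    ((PySem.List.pyRange 0 (PySem.Str.len s) length).map
      (fun i => PySem.List.slice s.toList (some i) (some (i + length))))))

-- ===== PRECONDITION & SPEC =====
-- A raises outside this: IndexError at split[0] for s = '' or length < 0 (empty chunk list),
-- ValueError (range step 0) for length = 0.
def Pre_compile (s : String) (length : Int) : Prop := 0 < length ∧ s ≠ ""
instance (s : String) (length : Int) : Decidable (Pre_compile s length) := by
  unfold Pre_compile; infer_instance

def pvWitness_compile : String × Int := ("aabba", 1)

def Spec_compile (s : String) (length : Int) (out : String) : Prop := out = compile_alt s length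
instance (s : String) (length : Int) (out : String) : Decidable (Spec_compile s length out) := by
  unfold Spec_compile; infer_instance

-- ===== CLAIM (what is proved, stated in full; the proofs are below) =====
def Claim_equal_compile : Prop := ∀ (s : String) (length : Int),
  Dom_compile s length → Pre_compile s length → Spec_compile s length (compile s length)

-- ===== LEMMAS AND PROOFS =====

-- how A emits one finished run of n repetitions of chunk pr
def emitRun (n : Int) (pr : List Char) : List Char :=
  if n == 1 then pr else PySem.Int.toChars n ++ pr

theorem joinNil_cons (a : List Char) (l : List (List Char)) :
    PySem.Chars.join [] (a :: l) = a ++ PySem.Chars.join [] l := by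
  cases l <;> simp [PySem.Chars.join, List.intercalate]

theorem compile_loop_eq (rest : List (List Char)) :
    ∀ (count : Int) (compressed prior : List Char), 1 ≤ count →
    (let st := rest.foldl compileStep (count, compressed, prior)
     if st.1 == 1 then st.2.1 ++ st.2.2 else st.2.1 ++ PySem.Int.toChars st.1 ++ st.2.2) =
    compressed ++ emitRun (count + (countRun prior rest : Int)) prior
      ++ PySem.Chars.join [] (runPieces (rest.drop (countRun prior rest))) := by
  induction rest with
  | nil =>
    intro count compressed prior _
    simp [countRun, emitRun, runPieces, PySem.Chars.join, List.intercalate]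
    split <;> simp
  | cons x xs ih =>
    intro count compressed prior hc
    cases hx : (prior == x) with
    | true =>
      obtain rfl := eq_of_beq hx
      simp only [List.foldl_cons, compileStep, BEq.refl, if_true]
      rw [ih (count + 1) compressed prior (by omega)]
      simp only [countRun, BEq.refl, if_true, List.drop_succ_cons]
      rw [show count + ((countRun prior xs + 1 : Nat) : Int) = count + 1 + (countRun prior xs : Int) by
        push_cast; ring]
    | false =>
      have hne : prior ≠ x := beq_eq_false_iff_ne.mp hx
      have hx0 : (x == prior) = false := beq_eq_false_iff_ne.mpr (Ne.symm hne)
      simp only [List.foldl_cons]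
      rw [show compileStep (count, compressed, prior) x
            = ((1 : Int), compressed ++ emitRun count prior, x) by
          simp only [compileStep, hx]
          rw [if_neg (by simp)]
          unfold emitRun
          split <;> simp]
      rw [ih 1 (compressed ++ emitRun count prior) x (by omega)]
      have hk0 : countRun prior (x :: xs) = 0 := by simp [countRun, hx0]
      rw [hk0]
      simp only [List.drop_zero, runPieces, joinNil_cons]
      rw [show (if ((countRun x xs : Int) + 1) == 1 then x
              else PySem.Int.toChars ((countRun x xs : Int) + 1) ++ x)
            = emitRun (1 + (countRun x xs : Int)) x by
          rw [emitRun, show (1 : Int) + (countRun x xs : Int) = (countRun x xs : Int) + 1 by ring]]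
      simp

theorem aCompress_eq (split : List (List Char)) (h : split ≠ []) :
    aCompress split = String.ofList (PySem.Chars.join [] (runPieces split)) := by
  obtain ⟨p, rest, rfl⟩ := List.exists_cons_of_ne_nil h
  unfold aCompress
  have hget : PySem.List.pyGet? (p :: rest) (0 : Int) = some p := by
    simp [PySem.List.pyGet?, PySem.List.pyIdx?]
  rw [hget]
  dsimp only
  rw [PySem.List.foldl_pyRange_pyGetD' (xs := p :: rest) (a := 1) (d := [])
        (f := compileStep) (init := ((1 : Int), ([] : List Char), p)) (by omega)]
  simp only [Int.toNat_one, List.drop_one, List.tail_cons]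
  unfold aFinish
  have hmain := compile_loop_eq rest 1 [] p (le_refl 1)
  simp only at hmain
  rw [hmain]
  simp only [runPieces, List.nil_append, joinNil_cons]
  congr 2
  rw [emitRun, show (1 : Int) + (countRun p rest : Int) = (countRun p rest : Int) + 1 by ring]

-- ===== VERDICT (by name: the statement is the Claim_ definition above) =====
theorem compile_spec : Claim_equal_compile := by
  intro s length _ hpre
  obtain ⟨hlen, hs⟩ := hpre
  unfold Spec_compile compile compile_alt
  rw [PySem.List.foldl_append_singleton_eq_map]
  simp only [List.nil_append]
  apply aCompress_eq
  have h0 : (0 : Int) ∈ PySem.List.pyRange 0 (PySem.Str.len s) length := by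
    rw [PySem.List.mem_pyRange_iff_of_pos hlen]
    refine ⟨le_refl 0, ?_, ⟨0, by simp⟩⟩
    have hnil : s.toList ≠ [] := by
      intro hn
      have h2 := congrArg String.ofList hn
      rw [String.ofList_toList] at h2
      exact hs (by simpa using h2)
    have hlp : 0 < s.toList.length := List.length_pos_of_ne_nil hnil
    rw [PySem.Str.len_eq]
    omega
  intro h
  have hmem : PySem.List.slice s.toList (some 0) (some (0 + length)) ∈
      (PySem.List.pyRange 0 (PySem.Str.len s) length).map
        (fun i => PySem.List.slice s.toList (some i) (some (i + length))) :=
    List.mem_map_of_mem h0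
  rw [h] at hmem; exact absurd hmem List.not_mem_nil
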